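-- pv_equiv track=rewrite | github.com/grapheneaffiliate/h4-polytopic-attention | solve_arc_b17.py | solve_b230c067
-- ===== SOURCE A (Python) =====
-- def solve_b230c067(grid):
--     grid = [row[:] for row in grid]
--     rows, cols = len(grid), len(grid[0])
--
--     def normalize_shape(comp):
--         min_r = min(r for r,c in comp)
--         min_c = min(c for r,c in comp)
--         return frozenset((r-min_r, c-min_c) for r,c in comp)
--
--     visited = [[False]*cols for _ in range(rows)]
--     components = []
--     for r in range(rows):
--         for c in range(cols):
--             if grid[r][c] == 8 and not visited[r][c]:
--                 component = set()
--                 stack = [(r, c)]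
--                 visited[r][c] = True
--                 while stack:
--                     cr, cc = stack.pop()
--                     component.add((cr, cc))
--                     for dr, dc in [(-1,0),(1,0),(0,-1),(0,1)]:
--                         nr, nc = cr+dr, cc+dc
--                         if 0 <= nr < rows and 0 <= nc < cols and not visited[nr][nc] and grid[nr][nc] == 8:
--                             visited[nr][nc] = True
--                             stack.append((nr, nc))
--                 components.append(component)
--
--     # Normalize shapes and count duplicates
--     norms = [normalize_shape(c) for c in components]
--     norm_counts = {}
--     for n in norms:
--         norm_counts[n] = norm_counts.get(n, 0) + 1
--
--     for i, component in enumerate(components):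
--         is_unique = (norm_counts[norms[i]] == 1)
--         color = 2 if is_unique else 1
--         for r, c in component:
--             grid[r][c] = color
--
--     return grid
-- ===== SOURCE B (Python) =====
-- def solve_b230c067(grid):
--     rows, cols = len(grid), len(grid[0])
--
--     def neighbors(r, c):
--         return ((r - 1, c), (r + 1, c), (r, c - 1), (r, c + 1))
--
--     def component_from(seed):
--         # grow the component by fixpoint dilation: repeatedly take every
--         # in-range 8-cell that is in the set or touches it, until stable
--         comp = {seed}
--         while True:
--             new = {(r, c) for r in range(rows) for c in range(cols)
--                    if grid[r][c] == 8 and ((r, c) in comp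
--                                            or any(nb in comp for nb in neighbors(r, c)))}
--             if new == comp:
--                 return comp
--             comp = new
--
--     comps = []
--     seen = set()
--     for r in range(rows):
--         for c in range(cols):
--             if grid[r][c] == 8 and (r, c) not in seen:
--                 comp = component_from((r, c))
--                 comps.append(comp)
--                 seen |= comp
--
--     def canon(comp):
--         mr = min(r for r, c in comp)
--         mc = min(c for r, c in comp)
--         return tuple(sorted((r - mr, c - mc) for r, c in comp))
--
--     shapes = [canon(comp) for comp in comps]
--     color = {}
--     for comp, shape in zip(comps, shapes):
--         col = 2 if shapes.count(shape) == 1 else 1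
--         for cell in comp:
--             color[cell] = col
--     return [[color.get((r, c), v) for c, v in enumerate(row)] for r, row in enumerate(grid)]
-- ===== Notes on version B (the rewrite author's own statement) =====
-- stated objective: alternative
-- what changed: Replaces the stack-based DFS flood fill with visited matrix and in-place recoloring by per-seed fixpoint dilation over the whole grid, canonical shapes as sorted tuples counted with list.count, and a functional grid rebuild through a cell-color dictionary.
import Mathlib
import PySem

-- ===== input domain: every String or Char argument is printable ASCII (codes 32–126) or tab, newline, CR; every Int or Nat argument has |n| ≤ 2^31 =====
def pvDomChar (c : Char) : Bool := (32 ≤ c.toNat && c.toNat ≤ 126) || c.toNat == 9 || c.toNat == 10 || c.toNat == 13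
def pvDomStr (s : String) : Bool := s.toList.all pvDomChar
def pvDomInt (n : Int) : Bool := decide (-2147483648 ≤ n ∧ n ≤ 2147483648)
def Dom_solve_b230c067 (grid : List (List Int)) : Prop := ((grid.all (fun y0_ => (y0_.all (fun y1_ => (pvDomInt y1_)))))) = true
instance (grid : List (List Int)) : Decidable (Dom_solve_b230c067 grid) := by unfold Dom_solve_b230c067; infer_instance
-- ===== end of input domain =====

-- B replaces A's stack DFS + visited matrix + in-place recoloring by per-seed fixpoint
-- dilation, sorted canonical shape tuples counted with list.count, and a functional rebuild
-- (objective: alternative; A also mutates only its private copy, so return values are all there is).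

-- ===== PORT A =====
-- shared cell helpers: grid[r][c] (read only at in-range indices), 0<=r<rows and 0<=c<cols
def gridAt (grid : List (List Int)) (p : Int × Int) : Int :=
  PySem.List.pyGetD (PySem.List.pyGetD grid p.1 []) p.2 0

def inb (rows cols : Int) (p : Int × Int) : Bool :=
  decide (0 ≤ p.1) && decide (p.1 < rows) && decide (0 ≤ p.2) && decide (p.2 < cols)

-- the row-major list of all in-range cells (both Pythons scan 'for r in range(rows) for c in range(cols)')
def allCells (rows cols : Int) : List (Int × Int) :=
  (PySem.List.pyRange 0 rows 1).flatMap (fun r => (PySem.List.pyRange 0 cols 1).map (fun c => (r, c)))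

-- one neighbour probe of A's inner 'for dr, dc in …' loop: push unvisited in-range 8-cells
def dfsPush (grid : List (List Int)) (rows cols : Int)
    (sv : List (Int × Int) × PySem.Set (Int × Int)) (nb : Int × Int) :
    List (Int × Int) × PySem.Set (Int × Int) :=
  if inb rows cols nb && !(sv.2.contains nb) && (gridAt grid nb == 8) then
    (nb :: sv.1, sv.2.add nb)
  else sv

-- A's 'while stack' DFS; the stack is kept head-first (Python pops the last element; the
-- produced component and visited are Python sets, so the pop order cannot affect them).
-- fuel is only a totality device; the wrapper passes enough for every input (proved below).
def dfsA (grid : List (List Int)) (rows cols : Int) :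
    Nat → List (Int × Int) → PySem.Set (Int × Int) → PySem.Set (Int × Int) →
    PySem.Set (Int × Int) × PySem.Set (Int × Int)
  | 0, _, vis, comp => (comp, vis)
  | _ + 1, [], vis, comp => (comp, vis)
  | fuel + 1, q :: rest, vis, comp =>
    let comp' := comp.add q
    let sv := [((-1 : Int), (0 : Int)), (1, 0), (0, -1), (0, 1)].foldl
      (fun sv d => dfsPush grid rows cols sv (q.1 + d.1, q.2 + d.2)) (rest, vis)
    dfsA grid rows cols fuel sv.1 sv.2 comp'

-- A's normalize_shape; the frozenset of offsets is modelled by the duplicate-free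
-- lex-sorted list (two frozensets are equal iff their sorted lists are equal)
def canonA (comp : PySem.Set (Int × Int)) : List (Int × Int) :=
  let mr := PySem.List.minD (comp.map (·.1)) (fun x => x) 0
  let mc := PySem.List.minD (comp.map (·.2)) (fun x => x) 0
  PySem.List.sorted (PySem.Set.ofList (comp.map (fun p => (p.1 - mr, p.2 - mc))))
    (fun p => toLex p) false

-- one grid[r][c] = color write
def writeCell (g : List (List Int)) (p : Int × Int) (color : Int) : List (List Int) :=
  PySem.List.pySetD g p.1 (PySem.List.pySetD (PySem.List.pyGetD g p.1 []) p.2 color)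

def solve_b230c067 (grid : List (List Int)) : List (List Int) :=
  -- grid = [row[:] for row in grid] : a private copy, identity here
  let rows := PySem.List.len grid
  let cols := PySem.List.len (PySem.List.pyGetD grid 0 [])  -- grid[0]: IndexError on [] (outside Pre_)
  let fuel := 2 * (rows.toNat * cols.toNat) + 1
  let scan := (allCells rows cols).foldl
    (fun (st : PySem.Set (Int × Int) × List (PySem.Set (Int × Int))) p =>
      if gridAt grid p == 8 && !(st.1.contains p) then
        let r := dfsA grid rows cols fuel [p] (st.1.add p) PySem.Set.empty
        (r.2, st.2 ++ [r.1])
      else st)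
    (PySem.Set.empty, [])
  let components := scan.2
  let norms := components.map canonA
  let normCounts := norms.foldl (fun d n => d.insert n (d.getD n 0 + 1))
    (PySem.Dict.empty : PySem.Dict (List (Int × Int)) Int)
  (components.zip norms).foldl
    (fun g cn =>
      let color : Int := if normCounts.getD cn.2 0 == 1 then 2 else 1
      cn.1.foldl (fun g p => writeCell g p color) g)
    grid

-- ===== PORT B =====
def nbrs (p : Int × Int) : List (Int × Int) :=
  [(p.1 - 1, p.2), (p.1 + 1, p.2), (p.1, p.2 - 1), (p.1, p.2 + 1)]

-- B's set comprehension: every in-range 8-cell that is in comp or touches it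
def satF (grid : List (List Int)) (rows cols : Int) (comp : PySem.Set (Int × Int)) :
    PySem.Set (Int × Int) :=
  PySem.Set.ofList ((allCells rows cols).filter
    (fun p => gridAt grid p == 8 && (comp.contains p || (nbrs p).any (fun q => comp.contains q))))

-- B's 'while True' dilation loop; fuel is a totality device (enough is passed, proved below)
def satLoop (grid : List (List Int)) (rows cols : Int) :
    Nat → PySem.Set (Int × Int) → PySem.Set (Int × Int)
  | 0, comp => comp
  | fuel + 1, comp =>
    let new := satF grid rows cols comp
    if PySem.Set.equal new comp then comp else satLoop grid rows cols fuel new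

-- B's canon: tuple(sorted(offsets)); Python sorts pairs lexicographically = the toLex key
def canonB (comp : PySem.Set (Int × Int)) : List (Int × Int) :=
  let mr := PySem.List.minD (comp.map (·.1)) (fun x => x) 0
  let mc := PySem.List.minD (comp.map (·.2)) (fun x => x) 0
  PySem.List.sorted (comp.map (fun p => (p.1 - mr, p.2 - mc))) (fun p => toLex p) false

def solve_b230c067_alt (grid : List (List Int)) : List (List Int) :=
  let rows := PySem.List.len grid
  let cols := PySem.List.len (PySem.List.pyGetD grid 0 [])  -- grid[0]: IndexError on [] (outside Pre_)
  let fuel := rows.toNat * cols.toNat + 1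
  let scan := (allCells rows cols).foldl
    (fun (st : List (PySem.Set (Int × Int)) × PySem.Set (Int × Int)) p =>
      if gridAt grid p == 8 && !(st.2.contains p) then
        let comp := satLoop grid rows cols fuel (PySem.Set.ofList [p])
        (st.1 ++ [comp], st.2.union comp)
      else st)
    ([], PySem.Set.empty)
  let comps := scan.1
  let shapes := comps.map canonB
  let color := (comps.zip shapes).foldl
    (fun (d : PySem.Dict (Int × Int) Int) cs =>
      let col : Int := if shapes.count cs.2 == 1 then 2 else 1
      cs.1.foldl (fun d p => d.insert p col) d)
    PySem.Dict.empty
  (PySem.List.enumerate grid).map (fun rrow =>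
    (PySem.List.enumerate rrow.2).map (fun cv => color.getD (rrow.1, cv.1) cv.2))

-- ===== PRECONDITION & SPEC =====
-- Pre_ excludes exactly the inputs where A raises IndexError: the empty grid (grid[0])
-- and ragged grids with some row shorter than row 0 (grid[r][c] for c < len(grid[0])).
def Pre_solve_b230c067 (grid : List (List Int)) : Prop :=
  grid ≠ [] ∧ ∀ row ∈ grid, (PySem.List.pyGetD grid 0 []).length ≤ row.length
instance (grid : List (List Int)) : Decidable (Pre_solve_b230c067 grid) := by
  unfold Pre_solve_b230c067; infer_instance

def pvWitness_solve_b230c067 : List (List Int) := [[8, 0, 8], [8, 0, 8], [0, 0, 8]]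

def Spec_solve_b230c067 (grid : List (List Int)) (out : List (List Int)) : Prop :=
  out = solve_b230c067_alt grid
instance (grid : List (List Int)) (out : List (List Int)) :
    Decidable (Spec_solve_b230c067 grid out) := by unfold Spec_solve_b230c067; infer_instance

-- ===== CLAIM (what is proved, stated in full; the proofs are below) =====
def Claim_equal_solve_b230c067 : Prop := ∀ (grid : List (List Int)),
  Dom_solve_b230c067 grid → Pre_solve_b230c067 grid →
  Spec_solve_b230c067 grid (solve_b230c067 grid)

-- ===== LEMMAS AND PROOFS =====


-- basic notions the proofs use (the ports never see these)
def Eight (grid : List (List Int)) (rows cols : Int) (p : Int × Int) : Prop :=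
  inb rows cols p = true ∧ gridAt grid p = 8

def Adj (grid : List (List Int)) (rows cols : Int) (p q : Int × Int) : Prop :=
  Eight grid rows cols p ∧ Eight grid rows cols q ∧ q ∈ nbrs p

def Reach (grid : List (List Int)) (rows cols : Int) (s x : Int × Int) : Prop :=
  Relation.ReflTransGen (Adj grid rows cols) s x

def Closed (grid : List (List Int)) (rows cols : Int) (vis : List (Int × Int)) : Prop :=
  ∀ x ∈ vis, ∀ y, Adj grid rows cols x y → y ∈ vis

def ucount (rows cols : Int) (vis : List (Int × Int)) : Nat :=
  (allCells rows cols).countP (fun p => !(PySem.Set.contains vis p))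

lemma mem_allCells {rows cols : Int} {p : Int × Int} :
    p ∈ allCells rows cols ↔ inb rows cols p = true := by
  obtain ⟨a, b⟩ := p
  constructor
  · intro h
    rcases List.mem_flatMap.mp h with ⟨r, hr, hmap⟩
    rcases List.mem_map.mp hmap with ⟨c, hc, he⟩
    rw [PySem.List.mem_pyRange_one] at hr hc
    cases he
    simp only [inb]
    simp only [decide_eq_true_eq, Bool.and_eq_true]
    exact ⟨⟨⟨hr.1, hr.2⟩, hc.1⟩, hc.2⟩
  · intro h
    simp only [inb, Bool.and_eq_true, decide_eq_true_eq] at h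
    refine List.mem_flatMap.mpr ⟨a, ?_, List.mem_map.mpr ⟨b, ?_, rfl⟩⟩ <;>
      rw [PySem.List.mem_pyRange_one] <;> omega

lemma length_allCells (rows cols : Int) :
    (allCells rows cols).length = rows.toNat * cols.toNat := by
  simp only [allCells, List.length_flatMap]
  have : ((PySem.List.pyRange 0 rows 1).map
      (fun r => ((PySem.List.pyRange 0 cols 1).map fun c => (r, c)).length)) =
      (PySem.List.pyRange 0 rows 1).map (fun _ => cols.toNat) := by
    apply List.map_congr_left
    intro r _
    simp [PySem.List.length_pyRange_one]
  rw [this, List.map_const', List.sum_replicate, smul_eq_mul,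
    PySem.List.length_pyRange_one]
  simp

lemma nbrs_symm {p q : Int × Int} : q ∈ nbrs p ↔ p ∈ nbrs q := by
  obtain ⟨a, b⟩ := p; obtain ⟨c, d⟩ := q
  simp [nbrs, Prod.ext_iff]
  omega

lemma adj_symm {grid rows cols} {p q : Int × Int}
    (h : Adj grid rows cols p q) : Adj grid rows cols q p :=
  ⟨h.2.1, h.1, nbrs_symm.mp h.2.2⟩

lemma reach_eight {grid rows cols} {s x : Int × Int}
    (hs : Eight grid rows cols s) (h : Reach grid rows cols s x) :
    Eight grid rows cols x := by
  induction h with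
  | refl => exact hs
  | tail _ hbc ih => exact hbc.2.1

lemma reach_not_mem_closed {grid rows cols} {vis : List (Int × Int)} {s x : Int × Int}
    (hcl : Closed grid rows cols vis) (hs : s ∉ vis)
    (h : Reach grid rows cols s x) : x ∉ vis := by
  induction h with
  | refl => exact hs
  | tail _ hbc ih =>
    intro hmem
    exact ih (hcl _ hmem _ (adj_symm hbc))

lemma countP_lt_of_witness {l : List (Int × Int)} {p q : (Int × Int) → Bool}
    (hmono : ∀ x ∈ l, q x = true → p x = true)
    {a : Int × Int} (ha : a ∈ l) (hpa : p a = true) (hqa : q a = false) :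
    l.countP q < l.countP p := by
  induction l with
  | nil => cases ha
  | cons b t ih =>
    rcases List.mem_cons.mp ha with rfl | hat
    · have : t.countP q ≤ t.countP p :=
        List.countP_mono_left (fun x hx => hmono x (List.mem_cons_of_mem _ hx))
      simp [hpa, hqa]
      omega
    · have := ih (fun x hx => hmono x (List.mem_cons_of_mem _ hx)) hat
      simp only [List.countP_cons]
      by_cases hqb : q b = true
      · have hpb := hmono b (List.mem_cons_self) hqb
        simp only [hqb, hpb]
        omega
      · simp only [Bool.not_eq_true] at hqb
        simp [hqb]
        split <;> omega

lemma ucount_lt {rows cols : Int} {v v' : List (Int × Int)}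
    (h : ∀ p, p ∈ v → p ∈ v') {a : Int × Int}
    (hain : a ∈ allCells rows cols) (hav' : a ∈ v') (hav : a ∉ v) :
    ucount rows cols v' < ucount rows cols v := by
  apply countP_lt_of_witness (a := a) ?_ hain ?_ ?_
  · intro x _ hx
    simp only [Bool.not_eq_eq_eq_not, Bool.not_true, PySem.Set.contains_eq_listContains,
      List.contains_eq_mem, decide_eq_false_iff_not] at hx ⊢
    exact fun hm => hx (h x hm)
  · simp [PySem.Set.contains_eq_listContains, List.contains_eq_mem, hav]
  · simp [PySem.Set.contains_eq_listContains, List.contains_eq_mem, hav']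

lemma ucount_le_cells (rows cols : Int) (v : List (Int × Int)) :
    ucount rows cols v ≤ rows.toNat * cols.toNat := by
  rw [← length_allCells]
  exact List.countP_le_length


lemma nbrs_eq_map (q : Int × Int) :
    nbrs q = [((-1 : Int), (0 : Int)), (1, 0), (0, -1), (0, 1)].map
      (fun d => (q.1 + d.1, q.2 + d.2)) := by
  simp [nbrs, Prod.ext_iff]
  omega

lemma nbrs_nodup (q : Int × Int) : (nbrs q).Nodup := by
  obtain ⟨a, b⟩ := q
  simp [nbrs, Prod.ext_iff]
  omega

lemma dirs_fold (grid : List (List Int)) (rows cols : Int) (q : Int × Int)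
    (sv0 : List (Int × Int) × PySem.Set (Int × Int)) :
    [((-1 : Int), (0 : Int)), (1, 0), (0, -1), (0, 1)].foldl
      (fun sv d => dfsPush grid rows cols sv (q.1 + d.1, q.2 + d.2)) sv0
    = (nbrs q).foldl (dfsPush grid rows cols) sv0 := by
  rw [nbrs_eq_map, List.foldl_map]

-- the condition under which A pushes a neighbour
def Cond (grid : List (List Int)) (rows cols : Int) (vis : List (Int × Int))
    (x : Int × Int) : Prop :=
  inb rows cols x = true ∧ gridAt grid x = 8 ∧ x ∉ vis

lemma pushFold (grid : List (List Int)) (rows cols : Int) :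
    ∀ (L : List (Int × Int)), L.Nodup →
    ∀ (st : List (Int × Int)) (vis : PySem.Set (Int × Int)), vis.Nodup →
    (∀ x, x ∈ (L.foldl (dfsPush grid rows cols) (st, vis)).2 ↔
        x ∈ vis ∨ (x ∈ L ∧ Cond grid rows cols vis x)) ∧
    (∀ x, x ∈ (L.foldl (dfsPush grid rows cols) (st, vis)).1 ↔
        x ∈ st ∨ (x ∈ L ∧ Cond grid rows cols vis x)) ∧
    (L.foldl (dfsPush grid rows cols) (st, vis)).2.Nodup ∧
    2 * ucount rows cols (L.foldl (dfsPush grid rows cols) (st, vis)).2 +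
        (L.foldl (dfsPush grid rows cols) (st, vis)).1.length ≤
      2 * ucount rows cols vis + st.length := by
  intro L
  induction L with
  | nil =>
    intro _ st vis hnd
    refine ⟨?_, ?_, hnd, le_refl _⟩ <;> simp
  | cons a L ih =>
    intro hnd st vis hvnd
    have haL : a ∉ L := (List.nodup_cons.mp hnd).1
    have hLnd : L.Nodup := (List.nodup_cons.mp hnd).2
    by_cases hc : (inb rows cols a && !(PySem.Set.contains vis a) && (gridAt grid a == 8)) = true
    · -- a is pushed
      have hinb : inb rows cols a = true := by
        simp only [Bool.and_eq_true] at hc; exact hc.1.1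
      have hnv : a ∉ vis := by
        simp only [Bool.and_eq_true, Bool.not_eq_eq_eq_not, Bool.not_true,
          PySem.Set.contains_eq_listContains, List.contains_eq_mem,
          decide_eq_false_iff_not] at hc
        exact hc.1.2
      have h8 : gridAt grid a = 8 := by
        simp only [Bool.and_eq_true, beq_iff_eq] at hc; exact hc.2
      have hstep : (a :: L).foldl (dfsPush grid rows cols) (st, vis) =
          L.foldl (dfsPush grid rows cols) (a :: st, vis.add a) := by
        simp only [List.foldl_cons, dfsPush, hc, if_pos]
      obtain ⟨h1, h2, h3, h4⟩ := ih hLnd (a :: st) (vis.add a) (PySem.Set.nodup_add vis a hvnd)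
      have hmemadd : ∀ x, x ∈ PySem.Set.add vis a ↔ x ∈ vis ∨ x = a :=
        fun x => PySem.Set.mem_add vis a x
      have hcondadd : ∀ x, x ∈ L → (Cond grid rows cols (vis.add a) x ↔ Cond grid rows cols vis x) := by
        intro x hxL
        unfold Cond
        constructor
        · rintro ⟨hi, hg, hnm⟩
          exact ⟨hi, hg, fun hm => hnm ((hmemadd x).mpr (Or.inl hm))⟩
        · rintro ⟨hi, hg, hnm⟩
          refine ⟨hi, hg, fun hm => ?_⟩
          rcases (hmemadd x).mp hm with h | rfl
          · exact hnm h
          · exact haL hxL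
      rw [hstep]
      refine ⟨?_, ?_, h3, ?_⟩
      · intro x
        rw [h1 x]
        constructor
        · rintro (hm | ⟨hxL, hcond⟩)
          · rcases (hmemadd x).mp hm with h | rfl
            · exact Or.inl h
            · exact Or.inr ⟨List.mem_cons_self, hinb, h8, hnv⟩
          · exact Or.inr ⟨List.mem_cons_of_mem _ hxL, (hcondadd x hxL).mp hcond⟩
        · rintro (hm | ⟨hxaL, hcond⟩)
          · exact Or.inl ((hmemadd x).mpr (Or.inl hm))
          · rcases List.mem_cons.mp hxaL with rfl | hxL
            · exact Or.inl ((hmemadd x).mpr (Or.inr rfl))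
            · exact Or.inr ⟨hxL, (hcondadd x hxL).mpr hcond⟩
      · intro x
        rw [h2 x]
        constructor
        · rintro (hm | ⟨hxL, hcond⟩)
          · rcases List.mem_cons.mp hm with rfl | hst
            · exact Or.inr ⟨List.mem_cons_self, hinb, h8, hnv⟩
            · exact Or.inl hst
          · exact Or.inr ⟨List.mem_cons_of_mem _ hxL, (hcondadd x hxL).mp hcond⟩
        · rintro (hst | ⟨hxaL, hcond⟩)
          · exact Or.inl (List.mem_cons_of_mem _ hst)
          · rcases List.mem_cons.mp hxaL with rfl | hxL
            · exact Or.inl List.mem_cons_self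
            · exact Or.inr ⟨hxL, (hcondadd x hxL).mpr hcond⟩
      · have hlt : ucount rows cols (vis.add a) < ucount rows cols vis :=
          ucount_lt (fun p hp => (hmemadd p).mpr (Or.inl hp))
            (mem_allCells.mpr hinb) ((hmemadd a).mpr (Or.inr rfl)) hnv
        have := h4
        simp only [List.length_cons] at this
        omega
    · -- a is not pushed
      have hstep : (a :: L).foldl (dfsPush grid rows cols) (st, vis) =
          L.foldl (dfsPush grid rows cols) (st, vis) := by
        simp only [List.foldl_cons, dfsPush, hc, Bool.false_eq_true, if_false]
      have hnca : ¬ Cond grid rows cols vis a := by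
        intro ⟨hi, hg, hnm⟩
        apply hc
        simp [hi, hg, PySem.Set.contains_eq_listContains, List.contains_eq_mem, hnm]
      obtain ⟨h1, h2, h3, h4⟩ := ih hLnd st vis hvnd
      rw [hstep]
      refine ⟨?_, ?_, h3, h4⟩
      · intro x
        rw [h1 x]
        constructor
        · rintro (hm | ⟨hxL, hcond⟩)
          · exact Or.inl hm
          · exact Or.inr ⟨List.mem_cons_of_mem _ hxL, hcond⟩
        · rintro (hm | ⟨hxaL, hcond⟩)
          · exact Or.inl hm
          · rcases List.mem_cons.mp hxaL with rfl | hxL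
            · exact absurd hcond hnca
            · exact Or.inr ⟨hxL, hcond⟩
      · intro x
        rw [h2 x]
        constructor
        · rintro (hm | ⟨hxL, hcond⟩)
          · exact Or.inl hm
          · exact Or.inr ⟨List.mem_cons_of_mem _ hxL, hcond⟩
        · rintro (hm | ⟨hxaL, hcond⟩)
          · exact Or.inl hm
          · rcases List.mem_cons.mp hxaL with rfl | hxL
            · exact absurd hcond hnca
            · exact Or.inr ⟨hxL, hcond⟩


lemma dfsA_final (grid : List (List Int)) (rows cols : Int) (V0 : List (Int × Int))
    (s : Int × Int) (hcl : Closed grid rows cols V0) (hsV : s ∉ V0)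
    (vis comp : PySem.Set (Int × Int))
    (hv : ∀ x, x ∈ vis ↔ x ∈ V0 ∨ x ∈ comp)
    (hcr : ∀ x ∈ comp, Reach grid rows cols s x)
    (hcc : ∀ x ∈ comp, ∀ y, Adj grid rows cols x y → y ∈ vis)
    (hsc : s ∈ comp) :
    (∀ x, x ∈ comp ↔ Reach grid rows cols s x) ∧
    (∀ x, x ∈ vis ↔ x ∈ V0 ∨ Reach grid rows cols s x) := by
  have hrc : ∀ x, Reach grid rows cols s x → x ∈ comp := by
    intro x hr
    induction hr with
    | refl => exact hsc
    | tail hb hbc ih =>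
      rename_i b c
      have hcv := hcc b ih c hbc
      rcases (hv c).mp hcv with hV | hcomp
      · exact absurd hV (reach_not_mem_closed hcl hsV (Relation.ReflTransGen.tail hb hbc))
      · exact hcomp
  refine ⟨fun x => ⟨hcr x, hrc x⟩, fun x => ?_⟩
  rw [hv x]
  exact or_congr_right ⟨hcr x, hrc x⟩

lemma dfsA_spec (grid : List (List Int)) (rows cols : Int) (V0 : List (Int × Int))
    (s : Int × Int) (hcl : Closed grid rows cols V0)
    (hs8 : Eight grid rows cols s) (hsV : s ∉ V0) :
    ∀ (fuel : Nat) (stack : List (Int × Int)) (vis comp : PySem.Set (Int × Int)),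
    (∀ x, x ∈ vis ↔ x ∈ V0 ∨ x ∈ comp ∨ x ∈ stack) →
    (∀ x ∈ stack, Reach grid rows cols s x) →
    (∀ x ∈ comp, Reach grid rows cols s x) →
    (∀ x ∈ comp, ∀ y, Adj grid rows cols x y → y ∈ vis) →
    (s ∈ stack ∨ s ∈ comp) →
    vis.Nodup → comp.Nodup →
    2 * ucount rows cols vis + stack.length ≤ fuel →
    (∀ x, x ∈ (dfsA grid rows cols fuel stack vis comp).1 ↔ Reach grid rows cols s x) ∧
    (∀ x, x ∈ (dfsA grid rows cols fuel stack vis comp).2 ↔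
      x ∈ V0 ∨ Reach grid rows cols s x) ∧
    (dfsA grid rows cols fuel stack vis comp).1.Nodup ∧
    (dfsA grid rows cols fuel stack vis comp).2.Nodup := by
  intro fuel
  induction fuel with
  | zero =>
    intro stack vis comp I1 I2 I3 I4 I5 nd1 nd2 hmu
    have hst : stack = [] := by
      cases stack with
      | nil => rfl
      | cons a t => simp at hmu
    subst hst
    have hsc : s ∈ comp := by rcases I5 with h | h; exacts [absurd h (List.not_mem_nil), h]
    have := dfsA_final grid rows cols V0 s hcl hsV vis comp
      (fun x => by rw [I1 x]; simp) I3 I4 hsc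
    have hd : dfsA grid rows cols 0 [] vis comp = (comp, vis) := rfl
    rw [hd]
    exact ⟨this.1, this.2, nd2, nd1⟩
  | succ fuel ih =>
    intro stack vis comp I1 I2 I3 I4 I5 nd1 nd2 hmu
    cases stack with
    | nil =>
      have hsc : s ∈ comp := by rcases I5 with h | h; exacts [absurd h (List.not_mem_nil), h]
      have := dfsA_final grid rows cols V0 s hcl hsV vis comp
        (fun x => by rw [I1 x]; simp) I3 I4 hsc
      have hd : dfsA grid rows cols (fuel + 1) [] vis comp = (comp, vis) := rfl
      rw [hd]
      exact ⟨this.1, this.2, nd2, nd1⟩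
    | cons q rest =>
      have hqv : q ∈ vis := (I1 q).mpr (Or.inr (Or.inr List.mem_cons_self))
      have hqr : Reach grid rows cols s q := I2 q List.mem_cons_self
      have hq8 : Eight grid rows cols q := reach_eight hs8 hqr
      have heq : dfsA grid rows cols (fuel + 1) (q :: rest) vis comp =
          dfsA grid rows cols fuel
            ((nbrs q).foldl (dfsPush grid rows cols) (rest, vis)).1
            ((nbrs q).foldl (dfsPush grid rows cols) (rest, vis)).2
            (comp.add q) := by
        show dfsA grid rows cols fuel _ _ _ = _
        rw [dirs_fold]
      rw [heq]
      obtain ⟨h1, h2, h3, h4⟩ := pushFold grid rows cols (nbrs q) (nbrs_nodup q) rest vis nd1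
      set sv := (nbrs q).foldl (dfsPush grid rows cols) (rest, vis) with hsv
      apply ih sv.1 sv.2 (comp.add q)
      · -- I1
        intro x
        rw [h1 x]
        constructor
        · rintro (hm | ⟨hxn, hcd⟩)
          · rcases (I1 x).mp hm with h | h | h
            · exact Or.inl h
            · exact Or.inr (Or.inl (PySem.Set.mem_add comp q x |>.mpr (Or.inl h)))
            · rcases List.mem_cons.mp h with rfl | h
              · exact Or.inr (Or.inl (PySem.Set.mem_add comp x x |>.mpr (Or.inr rfl)))
              · exact Or.inr (Or.inr ((h2 x).mpr (Or.inl h)))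
          · exact Or.inr (Or.inr ((h2 x).mpr (Or.inr ⟨hxn, hcd⟩)))
        · rintro (h | h | h)
          · exact Or.inl ((I1 x).mpr (Or.inl h))
          · rcases (PySem.Set.mem_add comp q x).mp h with h | rfl
            · exact Or.inl ((I1 x).mpr (Or.inr (Or.inl h)))
            · exact Or.inl hqv
          · rcases (h2 x).mp h with h | h
            · exact Or.inl ((I1 x).mpr (Or.inr (Or.inr (List.mem_cons_of_mem _ h))))
            · exact Or.inr h
      · -- I2
        intro x hx
        rcases (h2 x).mp hx with h | ⟨hxn, hinb, h8, _⟩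
        · exact I2 x (List.mem_cons_of_mem _ h)
        · exact Relation.ReflTransGen.tail hqr ⟨hq8, ⟨hinb, h8⟩, hxn⟩
      · -- I3
        intro x hx
        rcases (PySem.Set.mem_add comp q x).mp hx with h | rfl
        · exact I3 x h
        · exact hqr
      · -- I4
        intro x hx y hadj
        rcases (PySem.Set.mem_add comp q x).mp hx with h | rfl
        · exact (h1 y).mpr (Or.inl (I4 x h y hadj))
        · by_cases hyv : y ∈ vis
          · exact (h1 y).mpr (Or.inl hyv)
          · exact (h1 y).mpr (Or.inr ⟨hadj.2.2, hadj.2.1.1, hadj.2.1.2, hyv⟩)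
      · -- I5
        rcases I5 with h | h
        · rcases List.mem_cons.mp h with rfl | h
          · exact Or.inr (PySem.Set.mem_add comp s s |>.mpr (Or.inr rfl))
          · exact Or.inl ((h2 s).mpr (Or.inl h))
        · exact Or.inr (PySem.Set.mem_add comp q s |>.mpr (Or.inl h))
      · exact h3
      · exact PySem.Set.nodup_add comp q nd2
      · -- measure
        have := h4
        simp only [List.length_cons] at hmu
        omega


lemma satF_mem (grid : List (List Int)) (rows cols : Int)
    (comp : PySem.Set (Int × Int)) (x : Int × Int) :
    x ∈ satF grid rows cols comp ↔
      inb rows cols x = true ∧ gridAt grid x = 8 ∧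
        (x ∈ comp ∨ ∃ q ∈ nbrs x, q ∈ comp) := by
  unfold satF
  rw [PySem.Set.mem_ofList, List.mem_filter]
  simp only [Bool.and_eq_true, beq_iff_eq, Bool.or_eq_true, List.any_eq_true,
    PySem.Set.contains_eq_listContains, List.contains_eq_mem, decide_eq_true_eq]
  rw [mem_allCells]

lemma comp_subset_satF (grid : List (List Int)) (rows cols : Int) (s : Int × Int)
    (hs8 : Eight grid rows cols s) (comp : PySem.Set (Int × Int))
    (hr : ∀ x ∈ comp, Reach grid rows cols s x) :
    ∀ x ∈ comp, x ∈ satF grid rows cols comp := by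
  intro x hx
  have h8 := reach_eight hs8 (hr x hx)
  exact (satF_mem grid rows cols comp x).mpr ⟨h8.1, h8.2, Or.inl hx⟩

lemma satLoop_spec (grid : List (List Int)) (rows cols : Int) (s : Int × Int)
    (hs8 : Eight grid rows cols s) :
    ∀ (fuel : Nat) (comp : PySem.Set (Int × Int)),
    s ∈ comp →
    (∀ x ∈ comp, Reach grid rows cols s x) →
    comp.Nodup →
    ucount rows cols comp < fuel →
    (∀ x, x ∈ satLoop grid rows cols fuel comp ↔ Reach grid rows cols s x) ∧
    (satLoop grid rows cols fuel comp).Nodup := by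
  intro fuel
  induction fuel with
  | zero => intro comp _ _ _ hmu; omega
  | succ fuel ih =>
    intro comp hsc hr hnd hmu
    have hsub := comp_subset_satF grid rows cols s hs8 comp hr
    by_cases heq : PySem.Set.equal (satF grid rows cols comp) comp = true
    · have hiff := (PySem.Set.equal_iff _ _).mp heq
      have hstep : satLoop grid rows cols (fuel + 1) comp = comp := by
        simp only [satLoop, heq, if_pos]
      rw [hstep]
      refine ⟨fun x => ⟨hr x, ?_⟩, hnd⟩
      intro hrx
      induction hrx with
      | refl => exact hsc
      | tail hb hbc ihb =>
        rename_i b c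
        apply (hiff c).mp
        refine (satF_mem grid rows cols comp c).mpr
          ⟨hbc.2.1.1, hbc.2.1.2, Or.inr ⟨b, nbrs_symm.mp hbc.2.2, ihb⟩⟩
    · have hstep : satLoop grid rows cols (fuel + 1) comp =
          satLoop grid rows cols fuel (satF grid rows cols comp) := by
        simp only [satLoop, heq, Bool.false_eq_true, if_false]
      rw [hstep]
      -- invariants for the grown set
      have hr' : ∀ x ∈ satF grid rows cols comp, Reach grid rows cols s x := by
        intro x hx
        rcases (satF_mem grid rows cols comp x).mp hx with ⟨hi, hg, hc | ⟨q, hqn, hqc⟩⟩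
        · exact hr x hc
        · have hq8 := reach_eight hs8 (hr q hqc)
          exact Relation.ReflTransGen.tail (hr q hqc) ⟨hq8, ⟨hi, hg⟩, nbrs_symm.mpr hqn⟩
      have hw : ∃ w, w ∈ satF grid rows cols comp ∧ w ∉ comp := by
        by_contra hno
        push Not at hno
        apply heq
        rw [PySem.Set.equal_iff]
        exact fun x => ⟨fun hx => hno x hx, hsub x⟩
      obtain ⟨w, hwn, hwo⟩ := hw
      have hwin : w ∈ allCells rows cols :=
        mem_allCells.mpr ((satF_mem grid rows cols comp w).mp hwn).1
      have hlt : ucount rows cols (satF grid rows cols comp) < ucount rows cols comp :=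
        ucount_lt hsub hwin hwn hwo
      exact ih (satF grid rows cols comp) (hsub s hsc) hr'
        (PySem.Set.nodup_ofList _) (by omega)


-- the coupling between A's scan state (visited, components) and B's (comps, seen)
def ScanRel (grid : List (List Int)) (rows cols : Int)
    (stA : PySem.Set (Int × Int) × List (PySem.Set (Int × Int)))
    (stB : List (PySem.Set (Int × Int)) × PySem.Set (Int × Int)) : Prop :=
  List.Forall₂ (fun cA cB => (∀ x, x ∈ cA ↔ x ∈ cB) ∧ cA.Nodup ∧ cB.Nodup ∧
      ∃ sd, Eight grid rows cols sd ∧ (∀ x, x ∈ cA ↔ Reach grid rows cols sd x))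
    stA.2 stB.1 ∧
  (∀ x, x ∈ stA.1 ↔ ∃ c ∈ stA.2, x ∈ c) ∧
  (∀ x, x ∈ stB.2 ↔ x ∈ stA.1) ∧
  Closed grid rows cols stA.1 ∧
  stA.1.Nodup ∧
  stA.2.Pairwise (fun c d => ∀ x, x ∈ c → x ∉ d)

lemma forall₂_append {α β : Type} {R : α → β → Prop} {a c : List α} {b d : List β}
    (h1 : List.Forall₂ R a b) (h2 : List.Forall₂ R c d) :
    List.Forall₂ R (a ++ c) (b ++ d) := by
  induction h1 with
  | nil => exact h2
  | cons hr _ ih => exact List.Forall₂.cons hr ih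

lemma scan_spec (grid : List (List Int)) (rows cols : Int) :
    ∀ (L : List (Int × Int)), (∀ p ∈ L, inb rows cols p = true) →
    ∀ (stA : PySem.Set (Int × Int) × List (PySem.Set (Int × Int)))
      (stB : List (PySem.Set (Int × Int)) × PySem.Set (Int × Int)),
    ScanRel grid rows cols stA stB →
    ScanRel grid rows cols
      (L.foldl (fun (st : PySem.Set (Int × Int) × List (PySem.Set (Int × Int))) p =>
        if gridAt grid p == 8 && !(st.1.contains p) then
          let r := dfsA grid rows cols (2 * (rows.toNat * cols.toNat) + 1) [p]
            (st.1.add p) PySem.Set.empty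
          (r.2, st.2 ++ [r.1])
        else st) stA)
      (L.foldl (fun (st : List (PySem.Set (Int × Int)) × PySem.Set (Int × Int)) p =>
        if gridAt grid p == 8 && !(st.2.contains p) then
          let comp := satLoop grid rows cols (rows.toNat * cols.toNat + 1)
            (PySem.Set.ofList [p])
          (st.1 ++ [comp], st.2.union comp)
        else st) stB) := by
  intro L
  induction L with
  | nil => intro _ stA stB h; exact h
  | cons p L ih =>
    intro hL stA stB hrel
    obtain ⟨hF, hvis, hseen, hcl, hvnd, hdisj⟩ := hrel
    have hpin : inb rows cols p = true := hL p List.mem_cons_self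
    have hLin : ∀ q ∈ L, inb rows cols q = true :=
      fun q hq => hL q (List.mem_cons_of_mem _ hq)
    have hcontains : stB.2.contains p = stA.1.contains p := by
      by_cases h : p ∈ stA.1
      · have h2 : p ∈ stB.2 := (hseen p).mpr h
        simp [PySem.Set.contains_eq_listContains, List.contains_eq_mem, h, h2]
      · have h2 : p ∉ stB.2 := fun hm => h ((hseen p).mp hm)
        simp [PySem.Set.contains_eq_listContains, List.contains_eq_mem, h, h2]
    simp only [List.foldl_cons, hcontains]
    by_cases hg : (gridAt grid p == 8 && !(stA.1.contains p)) = true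
    · rw [if_pos hg, if_pos hg]
      have h8 : gridAt grid p = 8 := by
        simp only [Bool.and_eq_true, beq_iff_eq] at hg; exact hg.1
      have hpnv : p ∉ stA.1 := by
        simp only [Bool.and_eq_true, Bool.not_eq_eq_eq_not, Bool.not_true,
          PySem.Set.contains_eq_listContains, List.contains_eq_mem,
          decide_eq_false_iff_not] at hg
        exact hg.2
      have hp8 : Eight grid rows cols p := ⟨hpin, h8⟩
      -- A's DFS from p
      obtain ⟨hA1, hA2, hAnd1, hAnd2⟩ :=
        dfsA_spec grid rows cols stA.1 p hcl hp8 hpnv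
          (2 * (rows.toNat * cols.toNat) + 1) [p] (stA.1.add p) PySem.Set.empty
          (fun x => by
            rw [PySem.Set.mem_add]
            constructor
            · rintro (h | rfl)
              · exact Or.inl h
              · exact Or.inr (Or.inr List.mem_cons_self)
            · rintro (h | h | h)
              · exact Or.inl h
              · exact absurd h (List.not_mem_nil)
              · rcases List.mem_cons.mp h with rfl | h
                · exact Or.inr rfl
                · exact absurd h (List.not_mem_nil))
          (fun x hx => by
            rcases List.mem_cons.mp hx with rfl | h
            · exact Relation.ReflTransGen.refl
            · exact absurd h (List.not_mem_nil))
          (fun x hx => absurd hx (List.not_mem_nil))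
          (fun x hx => absurd hx (List.not_mem_nil))
          (Or.inl List.mem_cons_self)
          (PySem.Set.nodup_add stA.1 p hvnd) List.nodup_nil
          (by
            have := ucount_le_cells rows cols (stA.1.add p)
            simp only [List.length_cons, List.length_nil]
            omega)
      -- B's dilation from p
      obtain ⟨hB1, hBnd⟩ := satLoop_spec grid rows cols p hp8
        (rows.toNat * cols.toNat + 1) (PySem.Set.ofList [p])
        ((PySem.Set.mem_ofList _ _).mpr List.mem_cons_self)
        (fun x hx => by
          rcases List.mem_cons.mp ((PySem.Set.mem_ofList _ _).mp hx) with rfl | h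
          · exact Relation.ReflTransGen.refl
          · exact absurd h (List.not_mem_nil))
        (PySem.Set.nodup_ofList _)
        (by have := ucount_le_cells rows cols (PySem.Set.ofList [p]); omega)
      have hreach_not_vis : ∀ x, Reach grid rows cols p x → x ∉ stA.1 :=
        fun x hx => reach_not_mem_closed hcl hpnv hx
      apply ih hLin
      refine ⟨?_, ?_, ?_, ?_, hAnd2, ?_⟩
      · -- Forall₂ on components
        apply forall₂_append hF
        exact List.forall₂_cons.mpr
          ⟨⟨fun x => by rw [hA1 x, hB1 x], hAnd1, hBnd, p, hp8, hA1⟩, List.Forall₂.nil⟩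
      · -- visited = union of components
        intro x
        rw [hA2 x]
        constructor
        · rintro (h | h)
          · obtain ⟨c, hc, hxc⟩ := (hvis x).mp h
            exact ⟨c, List.mem_append_left _ hc, hxc⟩
          · exact ⟨_, List.mem_append_right _ List.mem_cons_self, (hA1 x).mpr h⟩
        · rintro ⟨c, hc, hxc⟩
          rcases List.mem_append.mp hc with h | h
          · exact Or.inl ((hvis x).mpr ⟨c, h, hxc⟩)
          · rcases List.mem_cons.mp h with rfl | h
            · exact Or.inr ((hA1 x).mp hxc)
            · exact absurd h (List.not_mem_nil)
      · -- B's seen tracks A's visited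
        intro x
        rw [PySem.Set.mem_union, hA2 x, hseen x, hB1 x]
      · -- visited stays closed
        intro x hx y hadj
        rcases (hA2 x).mp hx with h | h
        · exact (hA2 y).mpr (Or.inl (hcl x h y hadj))
        · exact (hA2 y).mpr (Or.inr (Relation.ReflTransGen.tail h hadj))
      · -- components stay pairwise disjoint
        apply List.pairwise_append.mpr
        refine ⟨hdisj, List.pairwise_singleton _ _, ?_⟩
        intro c hc c' hc' x hxc
        rcases List.mem_cons.mp hc' with rfl | h
        · intro hxc'
          exact hreach_not_vis x ((hA1 x).mp hxc') ((hvis x).mpr ⟨c, hc, hxc⟩)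
        · exact absurd h (List.not_mem_nil)
    · rw [if_neg hg, if_neg hg]
      exact ih hLin stA stB ⟨hF, hvis, hseen, hcl, hvnd, hdisj⟩


lemma minD_int_perm {xs ys : List Int} (d : Int) (h : xs.Perm ys) :
    PySem.List.minD xs (fun x => x) d = PySem.List.minD ys (fun x => x) d := by
  cases xs with
  | nil =>
    have : ys = [] := h.nil_eq.symm ▸ rfl
    rw [List.Perm.nil_eq h]
  | cons a t =>
    have hxne : (a :: t) ≠ [] := by simp
    have hyne : ys ≠ [] := by
      intro hy; subst hy; exact absurd h.symm.nil_eq (by simp)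
    apply le_antisymm
    · exact PySem.List.minD_id_le _ d _
        (h.symm.mem_iff.mp (PySem.List.minD_mem ys (fun x => x) d hyne))
    · exact PySem.List.minD_id_le _ d _
        (h.mem_iff.mp (PySem.List.minD_mem (a :: t) (fun x => x) d hxne))

lemma canon_eq {cA cB : PySem.Set (Int × Int)}
    (hmem : ∀ x, x ∈ cA ↔ x ∈ cB) (hndA : cA.Nodup) (hndB : cB.Nodup) :
    canonA cA = canonB cB := by
  have hperm : cA.Perm cB := (List.perm_ext_iff_of_nodup hndA hndB).mpr hmem
  simp only [canonA, canonB]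
  rw [minD_int_perm 0 (hperm.map (·.1)), minD_int_perm 0 (hperm.map (·.2))]
  set mr := PySem.List.minD (cB.map (·.1)) (fun x => x) 0
  set mc := PySem.List.minD (cB.map (·.2)) (fun x => x) 0
  have hinj : Function.Injective (fun p : Int × Int => (p.1 - mr, p.2 - mc)) := by
    intro a b hab
    simp only [Prod.ext_iff] at hab ⊢
    omega
  rw [PySem.Set.ofList_eq_self_of_nodup _ (hndA.map hinj)]
  exact PySem.List.sorted_eq_sorted_of_perm _ _ _
    (fun a b hab => toLex.injective hab) (hperm.map _)

lemma maps_canon_eq {compsA compsB : List (PySem.Set (Int × Int))}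
    (h : List.Forall₂ (fun cA cB => (∀ x, x ∈ cA ↔ x ∈ cB) ∧ cA.Nodup ∧ cB.Nodup)
      compsA compsB) :
    compsA.map canonA = compsB.map canonB := by
  induction h with
  | nil => rfl
  | cons hr _ ih =>
    simp only [List.map_cons, ih, canon_eq hr.1 hr.2.1 hr.2.2]

lemma normCounts_getD (norms : List (List (Int × Int))) (n : List (Int × Int)) :
    (norms.foldl (fun d n => d.insert n (d.getD n 0 + 1))
      (PySem.Dict.empty : PySem.Dict (List (Int × Int)) Int)).getD n 0 =
      (norms.count n : Int) := by
  rw [PySem.Dict.getD_foldl_insert_add_one]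
  simp [PySem.Dict.getD_empty]


-- ===== the recolor phase =====

-- entry of a grid, option-defaulted (only compared at in-range positions in the end)
def ent (g : List (List Int)) (i j : Nat) : Int := ((g[i]?.getD [])[j]?.getD 0)

lemma writeCell_eq (g : List (List Int)) (p : Int × Int) (col : Int)
    (h1 : 0 ≤ p.1) (hp1 : p.1.toNat < g.length) (h3 : 0 ≤ p.2) :
    writeCell g p col = g.set p.1.toNat (g[p.1.toNat].set p.2.toNat col) := by
  unfold writeCell
  rw [PySem.List.pyGetD_eq_getElem g [] h1 (by omega), PySem.List.pySetD_of_nonneg _ _ h3,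
    PySem.List.pySetD_of_nonneg _ _ h1]

lemma writeFold (rows cols : Int) (col : Int) :
    ∀ (cs : List (Int × Int)) (g : List (List Int)),
    (g.length : Int) = rows →
    (∀ (i : Nat) (hi : i < g.length), cols ≤ (g[i].length : Int)) →
    (∀ p ∈ cs, inb rows cols p = true) →
    (cs.foldl (fun g p => writeCell g p col) g).length = g.length ∧
    (∀ (i : Nat), ((cs.foldl (fun g p => writeCell g p col) g)[i]?.getD []).length =
      (g[i]?.getD []).length) ∧
    (∀ (i j : Nat), ent (cs.foldl (fun g p => writeCell g p col) g) i j =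
      if ((i : Int), (j : Int)) ∈ cs then col else ent g i j) := by
  intro cs
  induction cs with
  | nil => intro g _ _ _; exact ⟨rfl, fun _ => rfl, fun i j => by simp [ent]⟩
  | cons p cs ih =>
    intro g hrows hcols hin
    have hpin := hin p List.mem_cons_self
    simp only [inb, Bool.and_eq_true, decide_eq_true_eq] at hpin
    obtain ⟨⟨⟨hp1, _hp2⟩, hp3⟩, hp4⟩ := hpin
    have hplt : p.1.toNat < g.length := by omega
    have hrow : cols ≤ (g[p.1.toNat].length : Int) := hcols _ hplt
    have hqlt : p.2.toNat < g[p.1.toNat].length := by omega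
    have hw : writeCell g p col = g.set p.1.toNat (g[p.1.toNat].set p.2.toNat col) :=
      writeCell_eq g p col hp1 hplt hp3
    have hlen : (writeCell g p col).length = g.length := by rw [hw, List.length_set]
    have hrowlen : ∀ (i : Nat), ((writeCell g p col)[i]?.getD []).length =
        (g[i]?.getD []).length := by
      intro i
      rw [hw, List.getElem?_set]
      by_cases he : p.1.toNat = i
      · subst he
        simp [hplt, List.length_set]
      · simp [he]
    have hent : ∀ (i j : Nat), ent (writeCell g p col) i j =
        if p.1 = (i : Int) ∧ p.2 = (j : Int) then col else ent g i j := by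
      intro i j
      unfold ent
      rw [hw, List.getElem?_set]
      by_cases he : p.1.toNat = i
      · rw [if_pos he, if_pos (he ▸ hplt)]
        simp only [Option.getD_some]
        rw [List.getElem?_set]
        by_cases hf : p.2.toNat = j
        · rw [if_pos hf, if_pos (hf ▸ hqlt), if_pos (by omega)]
          simp
        · rw [if_neg hf, if_neg (by omega)]
          subst he
          rw [List.getElem?_eq_getElem hplt]
          simp
      · rw [if_neg he, if_neg (by omega)]
    obtain ⟨ih1, ih2, ih3⟩ := ih (writeCell g p col)
      (by rw [hlen]; exact hrows)
      (by
        intro i hi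
        have hi' : i < g.length := by rwa [hlen] at hi
        have := hrowlen i
        rw [List.getElem?_eq_getElem hi, List.getElem?_eq_getElem hi'] at this
        simp only [Option.getD_some] at this
        rw [this]
        exact hcols i hi')
      (fun q hq => hin q (List.mem_cons_of_mem _ hq))
    simp only [List.foldl_cons]
    refine ⟨by rw [ih1, hlen], fun i => by rw [ih2 i, hrowlen i], ?_⟩
    intro i j
    rw [ih3 i j, hent i j]
    by_cases hcs : ((i : Int), (j : Int)) ∈ cs
    · simp [hcs]
    · by_cases hpe : p = ((i : Int), (j : Int))
      · have : p.1 = (i : Int) ∧ p.2 = (j : Int) := by rw [hpe]; exact ⟨rfl, rfl⟩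
        simp [hcs, hpe]
      · have : ¬ (p.1 = (i : Int) ∧ p.2 = (j : Int)) := by
          intro ⟨ha, hb⟩
          exact hpe (Prod.ext ha hb)
        have hm : ((i : Int), (j : Int)) ∉ p :: cs := by
          intro hm
          rcases List.mem_cons.mp hm with he | he
          · exact hpe he.symm
          · exact hcs he
        simp [hcs, this, hm]

lemma zipWriteFold (rows cols : Int) (nc : PySem.Dict (List (Int × Int)) Int) :
    ∀ (zl : List (PySem.Set (Int × Int) × List (Int × Int))) (g : List (List Int)),
    (g.length : Int) = rows →
    (∀ (i : Nat) (hi : i < g.length), cols ≤ (g[i].length : Int)) →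
    (∀ pr ∈ zl, ∀ p ∈ pr.1, inb rows cols p = true) →
    zl.Pairwise (fun a b => ∀ x, x ∈ a.1 → x ∉ b.1) →
    (zl.foldl (fun g cn => cn.1.foldl
        (fun g p => writeCell g p (if nc.getD cn.2 0 == 1 then 2 else 1)) g) g).length =
      g.length ∧
    (∀ (i : Nat), ((zl.foldl (fun g cn => cn.1.foldl
        (fun g p => writeCell g p (if nc.getD cn.2 0 == 1 then 2 else 1)) g) g)[i]?.getD
        []).length = (g[i]?.getD []).length) ∧
    (∀ (k : Nat) (hk : k < zl.length) (i j : Nat), ((i : Int), (j : Int)) ∈ zl[k].1 →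
      ent (zl.foldl (fun g cn => cn.1.foldl
        (fun g p => writeCell g p (if nc.getD cn.2 0 == 1 then 2 else 1)) g) g) i j =
        (if nc.getD zl[k].2 0 == 1 then 2 else 1)) ∧
    (∀ (i j : Nat), (∀ (k : Nat) (hk : k < zl.length), ((i : Int), (j : Int)) ∉ zl[k].1) →
      ent (zl.foldl (fun g cn => cn.1.foldl
        (fun g p => writeCell g p (if nc.getD cn.2 0 == 1 then 2 else 1)) g) g) i j =
        ent g i j) := by
  intro zl
  induction zl with
  | nil => intro g _ _ _ _; exact ⟨rfl, fun _ => rfl, fun k hk => by simp at hk, fun i j _ => rfl⟩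
  | cons cn zl ih =>
    intro g hrows hcols hin hdisj
    obtain ⟨hd1, hd2⟩ := List.pairwise_cons.mp hdisj
    obtain ⟨w1, w2, w3⟩ := writeFold rows cols (if nc.getD cn.2 0 == 1 then 2 else 1)
      cn.1 g hrows hcols (hin cn List.mem_cons_self)
    set g' := cn.1.foldl (fun g p => writeCell g p (if nc.getD cn.2 0 == 1 then 2 else 1)) g
      with hg'
    have hrows' : (g'.length : Int) = rows := by rw [w1]; exact hrows
    have hcols' : ∀ (i : Nat) (hi : i < g'.length), cols ≤ (g'[i].length : Int) := by
      intro i hi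
      have hi'' : i < g.length := by rwa [w1] at hi
      have := w2 i
      rw [List.getElem?_eq_getElem hi, List.getElem?_eq_getElem hi''] at this
      simp only [Option.getD_some] at this
      rw [this]
      exact hcols i hi''
    obtain ⟨ih1, ih2, ih3, ih4⟩ := ih g' hrows' hcols'
      (fun pr hpr => hin pr (List.mem_cons_of_mem _ hpr)) hd2
    simp only [List.foldl_cons]
    refine ⟨by rw [ih1, w1], fun i => by rw [ih2 i, w2 i], ?_, ?_⟩
    · intro k hk i j hmem
      cases k with
      | zero =>
        simp only [List.getElem_cons_zero] at hmem ⊢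
        have hnot : ∀ (k : Nat) (hk : k < zl.length), ((i : Int), (j : Int)) ∉ zl[k].1 :=
          fun k hk hm => hd1 _ (List.getElem_mem hk) _ hmem hm
        rw [ih4 i j hnot, w3 i j, if_pos hmem]
        try rfl
      | succ k =>
        simp only [List.getElem_cons_succ] at hmem ⊢
        exact ih3 k (by simpa using hk) i j hmem
    · intro i j hnot
      have hnotzl : ∀ (k : Nat) (hk : k < zl.length), ((i : Int), (j : Int)) ∉ zl[k].1 :=
        fun k hk => hnot (k + 1) (by simpa using Nat.succ_lt_succ hk)
      have hnotc : ((i : Int), (j : Int)) ∉ cn.1 := by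
        have := hnot 0 (by simp)
        simpa using this
      rw [ih4 i j hnotzl, w3 i j, if_neg hnotc]

lemma insFold (col : Int) :
    ∀ (c : List (Int × Int)) (d : PySem.Dict (Int × Int) Int) (x : Int × Int) (dflt : Int),
    (c.foldl (fun d p => d.insert p col) d).getD x dflt =
      if x ∈ c then col else d.getD x dflt := by
  intro c
  induction c with
  | nil => intro d x dflt; simp
  | cons p c ih =>
    intro d x dflt
    simp only [List.foldl_cons]
    rw [ih]
    by_cases hx : x ∈ c
    · simp [hx]
    · rw [if_neg hx, PySem.Dict.getD_insert]
      by_cases he : x = p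
      · simp [he]
      · have : x ∉ p :: c := by
          intro hm
          rcases List.mem_cons.mp hm with h | h
          · exact he h
          · exact hx h
        simp [he, this]

lemma zipDictFold (shapes : List (List (Int × Int))) :
    ∀ (zl : List (PySem.Set (Int × Int) × List (Int × Int)))
      (d : PySem.Dict (Int × Int) Int),
    zl.Pairwise (fun a b => ∀ x, x ∈ a.1 → x ∉ b.1) →
    (∀ (k : Nat) (hk : k < zl.length) (x : Int × Int) (dflt : Int), x ∈ zl[k].1 →
      (zl.foldl (fun d cs => cs.1.foldl
        (fun d p => d.insert p (if shapes.count cs.2 == 1 then 2 else 1)) d) d).getD x dflt =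
        (if shapes.count zl[k].2 == 1 then 2 else 1)) ∧
    (∀ (x : Int × Int) (dflt : Int), (∀ (k : Nat) (hk : k < zl.length), x ∉ zl[k].1) →
      (zl.foldl (fun d cs => cs.1.foldl
        (fun d p => d.insert p (if shapes.count cs.2 == 1 then 2 else 1)) d) d).getD x dflt =
        d.getD x dflt) := by
  intro zl
  induction zl with
  | nil => exact fun d _ => ⟨fun k hk => by simp at hk, fun x dflt _ => rfl⟩
  | cons cs zl ih =>
    intro d hdisj
    obtain ⟨hd1, hd2⟩ := List.pairwise_cons.mp hdisj
    set d' := cs.1.foldl (fun d p => d.insert p (if shapes.count cs.2 == 1 then 2 else 1)) d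
      with hd'
    obtain ⟨ih1, ih2⟩ := ih d' hd2
    simp only [List.foldl_cons]
    constructor
    · intro k hk x dflt hmem
      cases k with
      | zero =>
        simp only [List.getElem_cons_zero] at hmem ⊢
        have hnot : ∀ (k : Nat) (hk : k < zl.length), x ∉ zl[k].1 :=
          fun k hk hm => hd1 _ (List.getElem_mem hk) _ hmem hm
        rw [ih2 x dflt hnot, hd', insFold, if_pos hmem]
        try rfl
      | succ k =>
        simp only [List.getElem_cons_succ] at hmem ⊢
        exact ih1 k (by simpa using hk) x dflt hmem
    · intro x dflt hnot
      have hnotzl : ∀ (k : Nat) (hk : k < zl.length), x ∉ zl[k].1 :=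
        fun k hk => hnot (k + 1) (by simpa using Nat.succ_lt_succ hk)
      have hnotc : x ∉ cs.1 := by
        have := hnot 0 (by simp)
        simpa using this
      rw [ih2 x dflt hnotzl, hd', insFold, if_neg hnotc]


lemma ent_eq_getElem (g : List (List Int)) (i j : Nat) (hi : i < g.length)
    (hj : j < g[i].length) : ent g i j = g[i][j] := by
  unfold ent
  rw [List.getElem?_eq_getElem hi]
  simp [List.getElem?_eq_getElem hj]

lemma pairwise_zip {α β : Type} {R : α → α → Prop} :
    ∀ {l1 : List α} (l2 : List β), l1.Pairwise R →
      (l1.zip l2).Pairwise (fun a b => R a.1 b.1) := by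
  intro l1
  induction l1 with
  | nil => intro l2 _; simp
  | cons a t ih =>
    intro l2 hp
    obtain ⟨hhead, htail⟩ := List.pairwise_cons.mp hp
    cases l2 with
    | nil => simp
    | cons b u =>
      apply List.pairwise_cons.mpr
      refine ⟨?_, ih u htail⟩
      rintro ⟨x, y⟩ hxy
      exact hhead x (List.of_mem_zip hxy).1

lemma forall₂_mem_right {α β : Type} {Q : α → β → Prop} :
    ∀ {l1 : List α} {l2 : List β}, List.Forall₂ Q l1 l2 →
      ∀ b ∈ l2, ∃ a ∈ l1, Q a b := by
  intro l1 l2 h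
  induction h with
  | nil => intro b hb; exact absurd hb (List.not_mem_nil)
  | cons hq _ ih =>
    intro b hb
    rcases List.mem_cons.mp hb with rfl | hb
    · exact ⟨_, List.mem_cons_self, hq⟩
    · obtain ⟨a, ha, hqa⟩ := ih b hb
      exact ⟨a, List.mem_cons_of_mem _ ha, hqa⟩

lemma pairwise_transfer {α β : Type} {Q : α → β → Prop} {P : α → α → Prop}
    {P' : β → β → Prop}
    (hmono : ∀ a b a' b', Q a a' → Q b b' → P a b → P' a' b') :
    ∀ {l1 : List α} {l2 : List β}, List.Forall₂ Q l1 l2 → l1.Pairwise P →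
      l2.Pairwise P' := by
  intro l1 l2 h
  induction h with
  | nil => intro _; exact List.Pairwise.nil
  | cons hq hrest ih =>
    intro hp
    obtain ⟨hhead, htail⟩ := List.pairwise_cons.mp hp
    apply List.pairwise_cons.mpr
    refine ⟨?_, ih htail⟩
    intro b' hb'
    obtain ⟨b, hb, hqb⟩ := forall₂_mem_right hrest b' hb'
    exact hmono _ _ _ _ hq hqb (hhead b hb)

lemma final_eq (grid : List (List Int)) (rows cols : Int)
    (hrows : rows = (grid.length : Int))
    (hcolsle : ∀ (i : Nat) (hi : i < grid.length), cols ≤ (grid[i].length : Int)) :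
    ((((allCells rows cols).foldl
        (fun (st : PySem.Set (Int × Int) × List (PySem.Set (Int × Int))) p =>
          if gridAt grid p == 8 && !(st.1.contains p) then
            let r := dfsA grid rows cols (2 * (rows.toNat * cols.toNat) + 1) [p]
              (st.1.add p) PySem.Set.empty
            (r.2, st.2 ++ [r.1])
          else st) (PySem.Set.empty, [])).2.zip
      (((allCells rows cols).foldl
        (fun (st : PySem.Set (Int × Int) × List (PySem.Set (Int × Int))) p =>
          if gridAt grid p == 8 && !(st.1.contains p) then
            let r := dfsA grid rows cols (2 * (rows.toNat * cols.toNat) + 1) [p]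
              (st.1.add p) PySem.Set.empty
            (r.2, st.2 ++ [r.1])
          else st) (PySem.Set.empty, [])).2.map canonA)).foldl
      (fun g cn => cn.1.foldl (fun g p => writeCell g p
        (if ((((allCells rows cols).foldl
            (fun (st : PySem.Set (Int × Int) × List (PySem.Set (Int × Int))) p =>
              if gridAt grid p == 8 && !(st.1.contains p) then
                let r := dfsA grid rows cols (2 * (rows.toNat * cols.toNat) + 1) [p]
                  (st.1.add p) PySem.Set.empty
                (r.2, st.2 ++ [r.1])
              else st) (PySem.Set.empty, [])).2.map canonA).foldl
            (fun d n => d.insert n (d.getD n 0 + 1))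
            (PySem.Dict.empty : PySem.Dict (List (Int × Int)) Int)).getD cn.2 0 == 1
          then 2 else 1)) g)
      grid)
    = (PySem.List.enumerate grid).map (fun rrow =>
        (PySem.List.enumerate rrow.2).map (fun cv =>
          ((((allCells rows cols).foldl
            (fun (st : List (PySem.Set (Int × Int)) × PySem.Set (Int × Int)) p =>
              if gridAt grid p == 8 && !(st.2.contains p) then
                let comp := satLoop grid rows cols (rows.toNat * cols.toNat + 1)
                  (PySem.Set.ofList [p])
                (st.1 ++ [comp], st.2.union comp)
              else st) ([], PySem.Set.empty)).1.zip
            (((allCells rows cols).foldl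
              (fun (st : List (PySem.Set (Int × Int)) × PySem.Set (Int × Int)) p =>
                if gridAt grid p == 8 && !(st.2.contains p) then
                  let comp := satLoop grid rows cols (rows.toNat * cols.toNat + 1)
                    (PySem.Set.ofList [p])
                  (st.1 ++ [comp], st.2.union comp)
                else st) ([], PySem.Set.empty)).1.map canonB)).foldl
            (fun (d : PySem.Dict (Int × Int) Int) cs => cs.1.foldl
              (fun d p => d.insert p
                (if (((allCells rows cols).foldl
                  (fun (st : List (PySem.Set (Int × Int)) × PySem.Set (Int × Int)) p =>
                    if gridAt grid p == 8 && !(st.2.contains p) then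
                      let comp := satLoop grid rows cols (rows.toNat * cols.toNat + 1)
                        (PySem.Set.ofList [p])
                      (st.1 ++ [comp], st.2.union comp)
                    else st) ([], PySem.Set.empty)).1.map canonB).count cs.2 == 1
                then 2 else 1)) d)
            PySem.Dict.empty).getD (rrow.1, cv.1) cv.2)) := by
  obtain ⟨hF, hvis, hseen, hcl, hvnd, hdisj⟩ :=
    scan_spec grid rows cols (allCells rows cols) (fun p hp => mem_allCells.mp hp)
      (PySem.Set.empty, []) ([], PySem.Set.empty)
      ⟨List.Forall₂.nil,
       fun x => by simp [PySem.Set.empty],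
       fun x => Iff.rfl,
       fun x hx => absurd hx (List.not_mem_nil),
       List.nodup_nil,
       List.Pairwise.nil⟩
  set compsA := ((allCells rows cols).foldl
      (fun (st : PySem.Set (Int × Int) × List (PySem.Set (Int × Int))) p =>
        if gridAt grid p == 8 && !(st.1.contains p) then
          let r := dfsA grid rows cols (2 * (rows.toNat * cols.toNat) + 1) [p]
            (st.1.add p) PySem.Set.empty
          (r.2, st.2 ++ [r.1])
        else st) (PySem.Set.empty, [])).2 with hcompsA
  set compsB := ((allCells rows cols).foldl
      (fun (st : List (PySem.Set (Int × Int)) × PySem.Set (Int × Int)) p =>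
        if gridAt grid p == 8 && !(st.2.contains p) then
          let comp := satLoop grid rows cols (rows.toNat * cols.toNat + 1)
            (PySem.Set.ofList [p])
          (st.1 ++ [comp], st.2.union comp)
        else st) ([], PySem.Set.empty)).1 with hcompsB
  have hlen : compsA.length = compsB.length := hF.length_eq
  have hmaps : compsA.map canonA = compsB.map canonB :=
    maps_canon_eq (List.Forall₂.imp (fun a b h => ⟨h.1, h.2.1, h.2.2.1⟩) hF)
  -- all component cells are in range
  have hcellsA : ∀ c ∈ compsA, ∀ p ∈ c, inb rows cols p = true := by
    intro c hc p hp
    obtain ⟨k, hk, hck⟩ := List.getElem_of_mem hc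
    obtain ⟨_, _, _, sd, hsd8, hsdr⟩ := hF.get hk (by omega)
    subst hck
    exact (reach_eight hsd8 ((hsdr p).mp hp)).1
  -- A-side writes
  obtain ⟨w1, w2, w3, w4⟩ := zipWriteFold rows cols
    ((compsA.map canonA).foldl (fun d n => d.insert n (d.getD n 0 + 1))
      (PySem.Dict.empty : PySem.Dict (List (Int × Int)) Int))
    (compsA.zip (compsA.map canonA)) grid hrows.symm hcolsle
    (by rintro ⟨c, n⟩ hpr p hp; exact hcellsA c (List.of_mem_zip hpr).1 p hp)
    (pairwise_zip _ hdisj)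
  -- B-side colour dictionary
  have hdisjB : compsB.Pairwise (fun c d => ∀ x, x ∈ c → x ∉ d) :=
    pairwise_transfer (fun a b a' b' hq hq' hp x hx hx' =>
      hp x ((hq.1 x).mpr hx) ((hq'.1 x).mpr hx')) hF hdisj
  obtain ⟨d3, d4⟩ := zipDictFold (compsB.map canonB)
    (compsB.zip (compsB.map canonB)) PySem.Dict.empty (pairwise_zip _ hdisjB)
  -- lengths of the zips
  have hzA : (compsA.zip (compsA.map canonA)).length = compsA.length := by
    simp [List.length_zip]
  have hzB : (compsB.zip (compsB.map canonB)).length = compsB.length := by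
    simp [List.length_zip]
  -- name the two result grids
  set W := (compsA.zip (compsA.map canonA)).foldl
      (fun g cn => cn.1.foldl (fun g p => writeCell g p
        (if ((compsA.map canonA).foldl (fun d n => d.insert n (d.getD n 0 + 1))
          (PySem.Dict.empty : PySem.Dict (List (Int × Int)) Int)).getD cn.2 0 == 1
        then 2 else 1)) g) grid with hW
  set D := (compsB.zip (compsB.map canonB)).foldl
      (fun (d : PySem.Dict (Int × Int) Int) cs => cs.1.foldl
        (fun d p => d.insert p
          (if (compsB.map canonB).count cs.2 == 1 then 2 else 1)) d)
      PySem.Dict.empty with hD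
  -- final extensional equality
  apply List.ext_getElem
  · rw [w1]
    simp [PySem.List.length_enumerate]
  · intro i hiL hiR
    have hig : i < grid.length := by rwa [w1] at hiL
    have hrowlen : W[i].length = grid[i].length := by
      have := w2 i
      rw [List.getElem?_eq_getElem hiL, List.getElem?_eq_getElem hig] at this
      simpa using this
    apply List.ext_getElem
    · rw [hrowlen]
      simp only [List.getElem_map]
      rw [PySem.List.getElem_enumerate _ _ _ (by simpa [PySem.List.length_enumerate] using hig)]
      simp [PySem.List.length_enumerate]
    · intro j hjL hjR
      have hjg : j < grid[i].length := by rwa [hrowlen] at hjL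
      have hentL : W[i][j] = ent W i j := (ent_eq_getElem _ i j hiL hjL).symm
      have hentR : ((PySem.List.enumerate grid).map (fun rrow =>
          (PySem.List.enumerate rrow.2).map (fun cv =>
            D.getD (rrow.1, cv.1) cv.2)))[i][j] =
          D.getD ((i : Int), (j : Int)) grid[i][j] := by
        have hrow' : ((PySem.List.enumerate grid).map (fun rrow =>
            (PySem.List.enumerate rrow.2).map (fun cv =>
              D.getD (rrow.1, cv.1) cv.2)))[i]'(by
                simpa [PySem.List.length_enumerate] using hig) =
            (PySem.List.enumerate grid[i]).map (fun cv =>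
              D.getD ((0 : Int) + (i : Int), cv.1) cv.2) := by
          simp only [List.getElem_map]
          rw [PySem.List.getElem_enumerate _ _ _
            (by simpa [PySem.List.length_enumerate] using hig)]
        rw [List.getElem_of_eq hrow']
        simp only [List.getElem_map]
        rw [PySem.List.getElem_enumerate _ _ _
            (by simpa [PySem.List.length_enumerate] using hjg)]
        simp
      rw [hentL, hentR]
      by_cases hx : ∃ (k : Nat) (hk : k < compsA.length), ((i : Int), (j : Int)) ∈ compsA[k]
      · obtain ⟨k, hk, hmem⟩ := hx
        have hzAk : (compsA.zip (compsA.map canonA))[k]'(by omega) =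
            (compsA[k], canonA compsA[k]) := by
          rw [List.getElem_zip, List.getElem_map]
        have hmemB : ((i : Int), (j : Int)) ∈ compsB[k]'(by omega) :=
          ((hF.get hk (by omega)).1 _).mp hmem
        have hzBk : (compsB.zip (compsB.map canonB))[k]'(by omega) =
            (compsB[k]'(by omega), canonB (compsB[k]'(by omega))) := by
          rw [List.getElem_zip, List.getElem_map]
        have hL := w3 k (by omega) i j (by rw [hzAk]; exact hmem)
        have hR := d3 k (by omega) ((i : Int), (j : Int)) grid[i][j] (by rw [hzBk]; exact hmemB)
        rw [hL, hR, hzAk, hzBk]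
        simp only
        rw [normCounts_getD]
        have hcanon : canonA compsA[k] = canonB (compsB[k]'(by omega)) := by
          have h1 : (compsA.map canonA)[k]'(by simpa using hk) = canonA compsA[k] :=
            List.getElem_map _
          have h2 : (compsB.map canonB)[k]'(by simp; omega) = canonB (compsB[k]'(by omega)) :=
            List.getElem_map _
          rw [← h1, ← h2]
          exact List.getElem_of_eq hmaps _
        rw [hcanon, hmaps]
        by_cases hc : (compsB.map canonB).count (canonB (compsB[k]'(by omega))) = 1
        · simp [hc]
        · have hci : ¬ ((compsB.map canonB).count (canonB (compsB[k]'(by omega))) : Int) = 1 := by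
            intro h
            exact hc (by exact_mod_cast h)
          simp [hc, hci]
      · have hnotA : ∀ (k : Nat) (hk : k < (compsA.zip (compsA.map canonA)).length),
            ((i : Int), (j : Int)) ∉ (compsA.zip (compsA.map canonA))[k].1 := by
          intro k hk hm
          rw [List.getElem_zip] at hm
          exact hx ⟨k, by omega, hm⟩
        have hnotB : ∀ (k : Nat) (hk : k < (compsB.zip (compsB.map canonB)).length),
            ((i : Int), (j : Int)) ∉ (compsB.zip (compsB.map canonB))[k].1 := by
          intro k hk hm
          rw [List.getElem_zip] at hm
          have : ((i : Int), (j : Int)) ∈ compsA[k]'(by omega) :=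
            ((hF.get (by omega) (by omega)).1 _).mpr hm
          exact hx ⟨k, by omega, this⟩
        rw [w4 i j hnotA, d4 _ _ hnotB]
        rw [ent_eq_getElem grid i j hig hjg]
        simp

-- ===== VERDICT (by name: the statement is the Claim_ definition above) =====
theorem solve_b230c067_spec : Claim_equal_solve_b230c067 := by
  intro grid _ hpre
  unfold Spec_solve_b230c067
  obtain ⟨hne, hrowsle⟩ := hpre
  have hrows : PySem.List.len grid = (grid.length : Int) := PySem.List.len_eq grid
  have hcolsle : ∀ (i : Nat) (hi : i < grid.length),
      PySem.List.len (PySem.List.pyGetD grid 0 []) ≤ (grid[i].length : Int) := by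
    intro i hi
    rw [PySem.List.len_eq]
    exact_mod_cast hrowsle grid[i] (List.getElem_mem hi)
  exact final_eq grid (PySem.List.len grid)
    (PySem.List.len (PySem.List.pyGetD grid 0 [])) hrows hcolsle
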